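-- pv_equiv track=rewrite | github.com/TRNDWC/HiCroPL_SBIR | read_output.py | split_train_val_metrics
-- ===== SOURCE A (Python) =====
-- def split_train_val_metrics(tags):
--     train_metrics = []
--     val_metrics = []
--     other_metrics = []
--     for tag in tags:
--         if tag.startswith("train") or tag == "loss":
--             train_metrics.append(tag)
--         elif tag.startswith("val") or tag.startswith("mAP") or tag.startswith("P@"):
--             val_metrics.append(tag)
--         else:
--             other_metrics.append(tag)
--     return train_metrics, val_metrics, other_metrics
-- ===== SOURCE B (Python) =====
-- def _cat(t):
--     if t.startswith("train") or t == "loss":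
--         return 0
--     if t.startswith("val") or t.startswith("mAP") or t.startswith("P@"):
--         return 1
--     return 2
--
--
-- def split_train_val_metrics(tags):
--     return ([t for t in tags if _cat(t) == 0],
--             [t for t in tags if _cat(t) == 1],
--             [t for t in tags if _cat(t) == 2])
-- ===== Notes on version B (the rewrite author's own statement) =====
-- stated objective: alternative
-- what changed: Replaces the single priority-ordered loop with three accumulators by a category function and three independent filtering passes over tags.
import Mathlib
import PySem

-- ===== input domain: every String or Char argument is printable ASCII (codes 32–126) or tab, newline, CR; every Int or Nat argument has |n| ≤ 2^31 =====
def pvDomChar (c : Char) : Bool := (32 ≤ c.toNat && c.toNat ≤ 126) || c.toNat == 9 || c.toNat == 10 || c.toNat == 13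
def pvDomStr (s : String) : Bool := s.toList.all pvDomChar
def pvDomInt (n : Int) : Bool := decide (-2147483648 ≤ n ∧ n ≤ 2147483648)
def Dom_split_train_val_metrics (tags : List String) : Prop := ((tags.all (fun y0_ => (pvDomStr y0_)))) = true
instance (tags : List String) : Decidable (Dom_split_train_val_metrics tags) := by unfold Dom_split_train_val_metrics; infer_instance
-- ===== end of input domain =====

-- B replaces A's single priority-ordered loop by a category function and three independent filter passes (alternative decomposition, same cost).


-- ===== PORT A =====
-- single loop over tags appending to three accumulators in branch-priority order
def split_train_val_metrics (tags : List String) : List String × List String × List String :=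
  let st := tags.foldl (fun (st : List String × List String × List String) tag =>
    if PySem.Str.startswith tag "train" || tag == "loss" then
      (st.1 ++ [tag], st.2.1, st.2.2)
    else if PySem.Str.startswith tag "val" || PySem.Str.startswith tag "mAP" || PySem.Str.startswith tag "P@" then
      (st.1, st.2.1 ++ [tag], st.2.2)
    else
      (st.1, st.2.1, st.2.2 ++ [tag])) ([], [], [])
  (st.1, st.2.1, st.2.2)

-- ===== PORT B =====
-- category function + three independent filtering passes
def pvCat (t : String) : Nat :=
  if PySem.Str.startswith t "train" || t == "loss" then 0
  else if PySem.Str.startswith t "val" || PySem.Str.startswith t "mAP" || PySem.Str.startswith t "P@" then 1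
  else 2

def split_train_val_metrics_alt (tags : List String) : List String × List String × List String :=
  (tags.filter (fun t => pvCat t == 0),
   tags.filter (fun t => pvCat t == 1),
   tags.filter (fun t => pvCat t == 2))

-- ===== PRECONDITION & SPEC =====
def Spec_split_train_val_metrics (tags : List String) (out : List String × List String × List String) : Prop := out = split_train_val_metrics_alt tags
instance (tags : List String) (out : List String × List String × List String) : Decidable (Spec_split_train_val_metrics tags out) := by unfold Spec_split_train_val_metrics; infer_instance

-- ===== CLAIM (what is proved, stated in full; the proofs are below) =====
def Claim_equal_split_train_val_metrics : Prop := ∀ (tags : List String), Dom_split_train_val_metrics tags → Spec_split_train_val_metrics tags (split_train_val_metrics tags)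

-- ===== LEMMAS AND PROOFS =====

theorem split_foldl_inv (tags a b c : List String) :
    tags.foldl (fun (st : List String × List String × List String) tag =>
      if PySem.Str.startswith tag "train" || tag == "loss" then
        (st.1 ++ [tag], st.2.1, st.2.2)
      else if PySem.Str.startswith tag "val" || PySem.Str.startswith tag "mAP" || PySem.Str.startswith tag "P@" then
        (st.1, st.2.1 ++ [tag], st.2.2)
      else
        (st.1, st.2.1, st.2.2 ++ [tag])) (a, b, c)
    = (a ++ tags.filter (fun t => pvCat t == 0),
       b ++ tags.filter (fun t => pvCat t == 1),
       c ++ tags.filter (fun t => pvCat t == 2)) := by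
  induction tags generalizing a b c with
  | nil => simp
  | cons t ts ih =>
    simp only [List.foldl_cons, List.filter_cons]
    by_cases h1 : (PySem.Str.startswith t "train" || t == "loss") = true
    · have hc : pvCat t = 0 := by simp only [pvCat, h1, if_true]
      rw [if_pos h1, ih]
      simp [hc, List.append_assoc]
    · by_cases h2 : (PySem.Str.startswith t "val" || PySem.Str.startswith t "mAP" || PySem.Str.startswith t "P@") = true
      · have hc : pvCat t = 1 := by simp only [pvCat, h1, h2, if_true, if_false, Bool.false_eq_true]
        rw [if_neg h1, if_pos h2, ih]
        simp [hc, List.append_assoc]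
      · have hc : pvCat t = 2 := by simp only [pvCat, h1, h2, if_false, Bool.false_eq_true]
        rw [if_neg h1, if_neg h2, ih]
        simp [hc, List.append_assoc]

-- ===== VERDICT (by name: the statement is the Claim_ definition above) =====
theorem split_train_val_metrics_spec : Claim_equal_split_train_val_metrics := by
  intro tags _
  show split_train_val_metrics tags = split_train_val_metrics_alt tags
  unfold split_train_val_metrics split_train_val_metrics_alt
  rw [split_foldl_inv]
  simp
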